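-- pv_equiv track=rewrite | github.com/ryeongse25/algorithm | 프로그래머스/1/1845. 폰켓몬/폰켓몬.py | solution
-- ===== SOURCE A (Python) =====
-- def solution(nums):
--     p = {}
--
--     for i in nums:
--         if i in p:
--             p[i] += 1
--         else:
--             p[i] = 1
--
--     return min(len(nums) // 2, len(p))
-- ===== SOURCE B (Python) =====
-- def solution(nums):
--     s = sorted(nums)
--     distinct = (1 if s else 0) + sum(1 for a, b in zip(s, s[1:]) if a != b)
--     return min(len(nums) // 2, distinct)
-- ===== Notes on version B (the rewrite author's own statement) =====
-- stated objective: alternative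
-- what changed: Counts distinct values by sorting a copy and counting adjacent changes in one zip sweep, instead of building a hash-map of counts; then takes the same min with half the length.
import Mathlib
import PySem

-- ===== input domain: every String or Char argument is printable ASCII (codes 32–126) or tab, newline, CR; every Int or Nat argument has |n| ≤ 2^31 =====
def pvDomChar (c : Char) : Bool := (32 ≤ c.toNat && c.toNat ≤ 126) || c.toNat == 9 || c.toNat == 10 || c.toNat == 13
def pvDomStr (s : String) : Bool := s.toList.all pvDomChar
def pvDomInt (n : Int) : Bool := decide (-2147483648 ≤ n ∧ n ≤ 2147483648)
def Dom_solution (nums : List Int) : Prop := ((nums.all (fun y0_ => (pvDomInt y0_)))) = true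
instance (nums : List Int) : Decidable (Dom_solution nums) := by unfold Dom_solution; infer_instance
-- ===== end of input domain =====

-- B counts distinct values by sorting a copy and counting adjacent changes, instead of A's hash-map of counts; same min with len//2.


-- ===== PORT A =====
def solution (nums : List Int) : Int :=
  let p := nums.foldl (fun d i =>
    if d.contains i then d.insert i (d.getD i 0 + 1) else d.insert i 1)
    (PySem.Dict.empty : PySem.Dict Int Int)
  min (PySem.Int.floordiv (PySem.List.len nums) 2) (p.size : Int)

-- ===== PORT B =====
def solution_alt (nums : List Int) : Int :=
  let s := PySem.List.sorted nums (fun x => x) false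
  let distinct : Int := (if s = [] then 0 else 1) +
    (((s.zip (PySem.List.slice s (some 1) none)).countP (fun p => p.1 != p.2) : Nat) : Int)
  min (PySem.Int.floordiv (PySem.List.len nums) 2) distinct

-- ===== PRECONDITION & SPEC =====
def Spec_solution (nums : List Int) (out : Int) : Prop := out = solution_alt nums
instance (nums : List Int) (out : Int) : Decidable (Spec_solution nums out) := by unfold Spec_solution; infer_instance

-- ===== CLAIM (what is proved, stated in full; the proofs are below) =====
def Claim_equal_solution : Prop := ∀ (nums : List Int), Dom_solution nums → Spec_solution nums (solution nums)

-- ===== LEMMAS AND PROOFS =====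

-- A's dict has exactly the distinct elements of nums as keys
lemma dict_size_eq (nums : List Int) :
    (nums.foldl (fun d i =>
      if d.contains i then d.insert i (d.getD i 0 + 1) else d.insert i 1)
      (PySem.Dict.empty : PySem.Dict Int Int)).size = nums.toFinset.card := by
  have hf : (fun (d : PySem.Dict Int Int) (i : Int) =>
      if d.contains i then d.insert i (d.getD i 0 + 1) else d.insert i 1)
      = fun d i => d.insert i (if d.contains i then d.getD i 0 + 1 else 1) := by
    funext d i; split <;> rfl
  rw [hf]
  have hk := PySem.Dict.keys_foldl_insert nums
    (fun (d : PySem.Dict Int Int) i => if d.contains i then d.getD i 0 + 1 else 1)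
    PySem.Dict.empty
  have hkeys : (nums.foldl
      (fun (d : PySem.Dict Int Int) i =>
        d.insert i (if d.contains i then d.getD i 0 + 1 else 1))
      PySem.Dict.empty).keys = PySem.Set.ofList nums := by
    simpa [PySem.Dict.keys_empty, PySem.Set.update_nil_left] using hk
  have hsize : ∀ (d : PySem.Dict Int Int), d.size = d.keys.length := by
    intro d; simp [PySem.Dict.size, PySem.Dict.keys]
  rw [hsize, hkeys]
  have hfin : (PySem.Set.ofList nums).toFinset = nums.toFinset := by
    ext x; simp [PySem.Set.mem_ofList]
  rw [← List.toFinset_card_of_nodup (PySem.Set.nodup_ofList nums), hfin]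

-- for a ≤-sorted list, 1 + number of adjacent changes = number of distinct values
lemma adj_count (l : List Int) (h : l.Pairwise (· ≤ ·)) :
    (if l = [] then 0 else 1) + (l.zip l.tail).countP (fun p => p.1 != p.2)
      = l.toFinset.card := by
  induction l with
  | nil => simp
  | cons a t ih =>
    cases t with
    | nil => simp
    | cons b t' =>
      have hpt : (b :: t').Pairwise (· ≤ ·) := h.tail
      have hab : a ≤ b := (List.pairwise_cons.mp h).1 b (by simp)
      have hat : ∀ c ∈ t', a ≤ c := fun c hc => (List.pairwise_cons.mp h).1 c (by simp [hc])
      have hbt : ∀ c ∈ t', b ≤ c := fun c hc => (List.pairwise_cons.mp hpt).1 c hc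
      have ihv := ih hpt
      by_cases hab' : a = b
      · subst hab'
        simp only [List.zip, List.tail, List.zipWith_cons_cons, List.countP_cons,
          List.toFinset_cons, Finset.insert_idem, bne_self_eq_false,
          List.cons_ne_nil, if_false, Bool.false_eq_true] at ihv ⊢
        omega
      · have hnotmem : a ∉ (b :: t').toFinset := by
          simp only [List.mem_toFinset, List.mem_cons]
          rintro (rfl | hc)
          · exact hab' rfl
          · exact hab' (le_antisymm hab (hbt a hc))
        have hcard : (a :: b :: t').toFinset.card = (b :: t').toFinset.card + 1 := by
          simp only [List.toFinset_cons (a := a)]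
          exact Finset.card_insert_of_notMem hnotmem
        have hne : (a != b) = true := bne_iff_ne.mpr hab'
        simp only [List.zip, List.tail, List.zipWith_cons_cons, List.countP_cons,
          List.cons_ne_nil, if_false, hne, if_true] at ihv ⊢
        omega

-- ===== VERDICT (by name: the statement is the Claim_ definition above) =====
theorem solution_spec : Claim_equal_solution := by
  intro nums _
  unfold Spec_solution solution solution_alt
  simp only []
  rw [dict_size_eq]
  have hs := PySem.List.sorted_perm nums (fun x => x) false
  have hp := PySem.List.sorted_pairwise nums (fun x => x)
  have hfin : (PySem.List.sorted nums (fun x => x) false).toFinset = nums.toFinset :=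
    List.toFinset_eq_of_perm _ _ hs
  rw [PySem.List.slice_from_one]
  rw [← hfin, ← adj_count _ hp]
  push_cast
  ring_nf
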